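-- pv_equiv track=rewrite | github.com/olte36/reinforcement-learning-climber | do_manual_climbing.py | generate_simple_route
-- ===== SOURCE A (Python) =====
-- def generate_simple_route(zone_width, zone_heigth, count):
--     prev = (110, 30)
--     route = []
--     for i in range(count):
--         for p in range(4):
--             point = None
--             if p == 1 or p == 2:
--                 point = (prev[0] + 60, prev[1] + 30)
--             elif p == 0 or p == 3 or p == 4:
--                 point = (prev[0] - 60, prev[1] + 30)
--             route.append(point)
--             prev = point
--     return route
-- ===== SOURCE B (Python) =====
-- def generate_simple_route(zone_width, zone_heigth, count):
--     xs = [50, 110, 170, 110]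
--     return [(xs[n % 4], 60 + 30 * n) for n in range(4 * count)]
-- ===== Notes on version B (the rewrite author's own statement) =====
-- stated objective: simpler
-- what changed: Replaced the state-threaded double loop (prev point carried through a 4-phase inner loop) by a direct closed-form comprehension: x is a period-4 lookup [50,110,170,110][n%4] and y = 60 + 30*n for step index n.
import Mathlib
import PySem

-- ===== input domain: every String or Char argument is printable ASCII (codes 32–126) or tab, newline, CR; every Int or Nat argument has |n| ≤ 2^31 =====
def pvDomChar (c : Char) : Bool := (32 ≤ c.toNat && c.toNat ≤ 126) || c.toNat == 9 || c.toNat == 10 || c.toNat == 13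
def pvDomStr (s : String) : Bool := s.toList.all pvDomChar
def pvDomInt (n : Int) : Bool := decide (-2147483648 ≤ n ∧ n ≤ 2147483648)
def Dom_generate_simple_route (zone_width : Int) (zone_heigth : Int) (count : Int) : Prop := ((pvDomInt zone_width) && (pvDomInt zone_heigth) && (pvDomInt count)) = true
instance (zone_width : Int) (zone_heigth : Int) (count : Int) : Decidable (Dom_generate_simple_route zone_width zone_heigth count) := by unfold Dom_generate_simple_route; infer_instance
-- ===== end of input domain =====

-- B replaces A's prev-threaded double loop by a closed-form comprehension (x from a
-- period-4 table, y = 60 + 30*n); objective: simpler.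

-- ===== PORT A =====
-- Inner branch: in Python `point` starts as None, but for every p in range(4) one of the
-- two branches fires (the elif condition p==0/3/4 covers every remaining p), so the
-- if/else below is exact.
def generate_simple_route (zone_width : Int) (zone_heigth : Int) (count : Int) : List (Int × Int) :=
  (((PySem.List.pyRange 0 count 1).foldl
    (fun (st : (Int × Int) × List (Int × Int)) (_i : Int) =>
      (PySem.List.pyRange 0 4 1).foldl
        (fun (st : (Int × Int) × List (Int × Int)) (p : Int) =>
          let prev := st.1
          let point := if p == 1 || p == 2 then (prev.1 + 60, prev.2 + 30)
                       else (prev.1 - 60, prev.2 + 30)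
          (point, st.2 ++ [point])) st)
    ((110, 30), []))).2

-- ===== PORT B =====
-- xs[n % 4]: n ranges over 0 ≤ n, so n % 4 ∈ {0,1,2,3} and the lookup never misses;
-- pyGetD with default 0 is exact here.
def generate_simple_route_alt (zone_width : Int) (zone_heigth : Int) (count : Int) : List (Int × Int) :=
  (PySem.List.pyRange 0 (4 * count) 1).map
    (fun n => (PySem.List.pyGetD [50, 110, 170, 110] (PySem.Int.mod n 4) 0, 60 + 30 * n))

-- ===== PRECONDITION & SPEC =====
def Spec_generate_simple_route (zone_width : Int) (zone_heigth : Int) (count : Int) (out : List (Int × Int)) : Prop := out = generate_simple_route_alt zone_width zone_heigth count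
instance (zone_width : Int) (zone_heigth : Int) (count : Int) (out : List (Int × Int)) : Decidable (Spec_generate_simple_route zone_width zone_heigth count out) := by unfold Spec_generate_simple_route; infer_instance

-- ===== CLAIM (what is proved, stated in full; the proofs are below) =====
def Claim_equal_generate_simple_route : Prop := ∀ (zone_width : Int) (zone_heigth : Int) (count : Int), Dom_generate_simple_route zone_width zone_heigth count → Spec_generate_simple_route zone_width zone_heigth count (generate_simple_route zone_width zone_heigth count)

-- ===== LEMMAS AND PROOFS =====

def pvF (n : Int) : Int × Int :=
  (PySem.List.pyGetD [50, 110, 170, 110] (PySem.Int.mod n 4) 0, 60 + 30 * n)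

def pvBody (st : (Int × Int) × List (Int × Int)) (_i : Int) : (Int × Int) × List (Int × Int) :=
  (PySem.List.pyRange 0 4 1).foldl
    (fun (st : (Int × Int) × List (Int × Int)) (p : Int) =>
      let prev := st.1
      let point := if p == 1 || p == 2 then (prev.1 + 60, prev.2 + 30)
                   else (prev.1 - 60, prev.2 + 30)
      (point, st.2 ++ [point])) st

lemma pvF_eval (k : Nat) :
    pvF (4 * k) = ((50 : Int), (60 : Int) + 120 * k) ∧
    pvF (4 * k + 1) = ((110 : Int), (90 : Int) + 120 * k) ∧
    pvF (4 * k + 2) = ((170 : Int), (120 : Int) + 120 * k) ∧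
    pvF (4 * k + 3) = ((110 : Int), (150 : Int) + 120 * k) := by
  refine ⟨?_, ?_, ?_, ?_⟩ <;>
    simp [pvF, PySem.Int.mod, PySem.List.pyGetD, PySem.List.pyGet?, PySem.List.pyIdx?] <;> ring

lemma pvLoop_inv (k : Nat) :
    (PySem.List.pyRange 0 (k : Int) 1).foldl pvBody ((110, 30), []) =
      (((110 : Int), (30 : Int) + 120 * k), (PySem.List.pyRange 0 (4 * k) 1).map pvF) := by
  induction k with
  | zero => simp [PySem.List.pyRange_one_eq_nil]
  | succ k ih =>
    have hsplit : PySem.List.pyRange 0 ((k : Int) + 1) 1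
        = PySem.List.pyRange 0 (k : Int) 1 ++ [(k : Int)] := by
      exact PySem.List.pyRange_one_succ_right (by positivity)
    have hsplit4 : PySem.List.pyRange 0 (4 * ((k : Nat) + 1) : Int) 1
        = PySem.List.pyRange 0 (4 * k : Int) 1 ++
          [(4 * k : Int), 4 * k + 1, 4 * k + 2, 4 * k + 3] := by
      have h1 : PySem.List.pyRange 0 (4 * (k : Int) + 4) 1
          = PySem.List.pyRange 0 (4 * (k : Int)) 1 ++ PySem.List.pyRange (4 * (k : Int)) (4 * (k : Int) + 4) 1 :=
        PySem.List.pyRange_one_append _ _ _ (by positivity) (by omega)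
      have h2 : PySem.List.pyRange (4 * (k : Int)) (4 * (k : Int) + 4) 1
          = [(4 * k : Int), 4 * k + 1, 4 * k + 2, 4 * k + 3] := by
        rw [PySem.List.pyRange_one_cons (by omega), PySem.List.pyRange_one_cons (by omega),
            PySem.List.pyRange_one_cons (by omega), PySem.List.pyRange_one_cons (by omega),
            PySem.List.pyRange_one_eq_nil (by omega)]
        norm_num
        omega
      rw [show (4 * ((k : Nat) + 1) : Int) = 4 * (k : Int) + 4 by push_cast; ring, h1, h2]
    push_cast
    rw [hsplit, List.foldl_append, ih]
    obtain ⟨e0, e1, e2, e3⟩ := pvF_eval k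
    rw [hsplit4]
    simp only [List.foldl, List.map_append, List.map_cons, List.map_nil, e0, e1, e2, e3]
    unfold pvBody
    rw [show PySem.List.pyRange 0 4 1 = [0, 1, 2, 3] by decide]
    simp only [List.foldl]
    norm_num
    constructor
    · push_cast; ring
    · refine ⟨?_, ?_, ?_, ?_⟩ <;> push_cast <;> ring

-- ===== VERDICT (by name: the statement is the Claim_ definition above) =====
theorem generate_simple_route_spec : Claim_equal_generate_simple_route := by
  intro zw zh count _hd
  unfold Spec_generate_simple_route generate_simple_route generate_simple_route_alt
  by_cases h : count ≤ 0
  · rw [PySem.List.pyRange_one_eq_nil h,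
        PySem.List.pyRange_one_eq_nil (a := 0) (b := 4 * count) (by omega)]
    simp
  · have hc : count = ((count.toNat : Nat) : Int) := by omega
    rw [hc]
    have := pvLoop_inv count.toNat
    unfold pvBody at this
    rw [show (4 * ((count.toNat : Nat) : Int)) = ((4 * count.toNat : Nat) : Int) by push_cast; ring]
    rw [this]
    rfl
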